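-- pv_equiv track=rewrite | github.com/ayoubc/competitive-programming | online_judges/kattis/gcds.py | solve
-- ===== SOURCE A (Python) =====
-- def gcd(a, b):
--     if b == 0:
--         return a
--     return gcd(b, a % b)
--
-- def solve(n, a):
--     unique_a = []
--     s = set()
--     for ele in a:
--         if ele not in s:
--             unique_a.append(ele)
--             s.add(ele)
--
--     ans = set()
--     for i in range(len(unique_a)):
--         cur = unique_a[i]
--         for j in range(i, len(unique_a)):
--             cur = gcd(cur, unique_a[j])
--             ans.add(cur)
--
--     return len(ans)
-- ===== SOURCE B (Python) =====
-- def gcd(a, b):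
--     if b == 0:
--         return a
--     return gcd(b, a % b)
--
-- def solve(n, a):
--     unique = list(dict.fromkeys(a))
--     ans = set()
--     prev = set()
--     for x in unique:
--         cur = {gcd(g, x) for g in prev}
--         cur.add(x)
--         ans |= cur
--         prev = cur
--     return len(ans)
-- ===== Notes on version B (the rewrite author's own statement) =====
-- stated objective: faster
-- what changed: Instead of restarting a running gcd from every left endpoint of the deduped array (nested loops), B sweeps once, maintaining the set of distinct gcds of segments ending at the current position and folding it into the answer set.
import Mathlib
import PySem

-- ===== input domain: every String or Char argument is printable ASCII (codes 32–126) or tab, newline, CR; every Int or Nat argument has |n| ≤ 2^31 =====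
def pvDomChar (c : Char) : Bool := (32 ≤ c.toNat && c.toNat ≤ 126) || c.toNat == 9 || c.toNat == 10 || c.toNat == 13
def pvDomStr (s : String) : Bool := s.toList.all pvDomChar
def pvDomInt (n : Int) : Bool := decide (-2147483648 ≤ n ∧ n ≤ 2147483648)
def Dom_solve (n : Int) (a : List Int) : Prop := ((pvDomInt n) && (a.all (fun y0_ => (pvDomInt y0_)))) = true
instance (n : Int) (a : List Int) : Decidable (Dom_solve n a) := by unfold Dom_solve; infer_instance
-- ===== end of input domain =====

-- B replaces A's quadratic restart-from-every-left-endpoint double loop by a single sweep that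
-- maintains the set of distinct gcds of segments ending at the current position (objective: faster).

-- ===== PORT A =====
-- shared helper: both Source A and Source B define the identical recursive 'gcd' (Python's '%' = PySem.Int.mod)
def pyGcd (a b : Int) : Int :=
  if h : b = 0 then a else pyGcd b (PySem.Int.mod a b)
termination_by b.natAbs
decreasing_by
  rcases lt_trichotomy b 0 with hb | hb | hb
  · have := PySem.Int.mod_neg_bounds a hb; omega
  · exact absurd hb h
  · have h1 := PySem.Int.mod_nonneg a hb
    have h2 := PySem.Int.mod_lt a hb
    omega

def solve (n : Int) (a : List Int) : Int :=
  -- unique_a/s dedup loop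
  let st := a.foldl
    (fun (st : List Int × PySem.Set Int) ele =>
      if PySem.Set.contains st.2 ele then st
      else (st.1 ++ [ele], PySem.Set.add st.2 ele))
    ([], PySem.Set.empty)
  let u := st.1
  -- nested loops: for i in range(len(u)): cur = u[i]; for j in range(i, len(u)): cur = gcd(cur, u[j]); ans.add(cur)
  let ans := (PySem.List.pyRange 0 (PySem.List.len u)).foldl
    (fun (ans : PySem.Set Int) i =>
      ((PySem.List.pyRange i (PySem.List.len u)).foldl
        (fun (p : Int × PySem.Set Int) j =>
          let c := pyGcd p.1 (PySem.List.pyGetD u j 0)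
          (c, PySem.Set.add p.2 c))
        (PySem.List.pyGetD u i 0, ans)).2)
    PySem.Set.empty
  PySem.Set.len ans

-- ===== PORT B =====
def solve_alt (n : Int) (a : List Int) : Int :=
  let u := PySem.List.dedup a            -- list(dict.fromkeys(a))
  -- one sweep: prev = gcds of segments ending at the previous element
  let st := u.foldl
    (fun (st : PySem.Set Int × PySem.Set Int) x =>
      let cur := PySem.Set.add (PySem.Set.ofList (st.2.map (fun g => pyGcd g x))) x
      (PySem.Set.union st.1 cur, cur))
    (PySem.Set.empty, PySem.Set.empty)
  PySem.Set.len st.1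

-- ===== PRECONDITION & SPEC =====
def Spec_solve (n : Int) (a : List Int) (out : Int) : Prop := out = solve_alt n a
instance (n : Int) (a : List Int) (out : Int) : Decidable (Spec_solve n a out) := by unfold Spec_solve; infer_instance

-- ===== CLAIM (what is proved, stated in full; the proofs are below) =====
def Claim_equal_solve : Prop := ∀ (n : Int) (a : List Int), Dom_solve n a → Spec_solve n a (solve n a)

-- ===== LEMMAS AND PROOFS =====

-- running gcd of a segment: value of A's 'cur' after folding pyGcd over the segment's tail
def segFold (h : Int) (l : List Int) : Int := l.foldl pyGcd h

-- x is the running gcd of some nonempty contiguous segment of u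
def SegMem (u : List Int) (x : Int) : Prop :=
  ∃ pre h rest, u = pre ++ h :: rest ∧ ∃ mid suf, rest = mid ++ suf ∧ x = segFold h mid

-- proof-side names for the ports' loop bodies (definitionally the port's lambdas)
def stepD : (List Int × PySem.Set Int) → Int → (List Int × PySem.Set Int) :=
  fun st ele =>
    if PySem.Set.contains st.2 ele then st
    else (st.1 ++ [ele], PySem.Set.add st.2 ele)

def fA : (Int × PySem.Set Int) → Int → (Int × PySem.Set Int) :=
  fun p v =>
    let c := pyGcd p.1 v
    (c, PySem.Set.add p.2 c)

def outerStep (u : List Int) : PySem.Set Int → Int → PySem.Set Int :=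
  fun ans i =>
    ((PySem.List.pyRange i (PySem.List.len u)).foldl
      (fun (p : Int × PySem.Set Int) j =>
        let c := pyGcd p.1 (PySem.List.pyGetD u j 0)
        (c, PySem.Set.add p.2 c))
      (PySem.List.pyGetD u i 0, ans)).2

def ansA (u : List Int) : PySem.Set Int :=
  (PySem.List.pyRange 0 (PySem.List.len u)).foldl (outerStep u) PySem.Set.empty

def stepB : (PySem.Set Int × PySem.Set Int) → Int → (PySem.Set Int × PySem.Set Int) :=
  fun st x =>
    let cur := PySem.Set.add (PySem.Set.ofList (st.2.map (fun g => pyGcd g x))) x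
    (PySem.Set.union st.1 cur, cur)

theorem pyGcd_zero (a : Int) : pyGcd a 0 = a := by
  rw [pyGcd]; simp

theorem pyGcd_self (a : Int) : pyGcd a a = a := by
  by_cases h : a = 0
  · subst h; exact pyGcd_zero 0
  · rw [pyGcd]
    simp only [h, dite_false]
    have : PySem.Int.mod a a = 0 := (PySem.Int.mod_eq_zero_iff_dvd a a).mpr dvd_rfl
    rw [this, pyGcd_zero]

theorem segFold_cons (h y : Int) (l : List Int) :
    segFold h (y :: l) = segFold (pyGcd h y) l := rfl

theorem segFold_self (h : Int) (l : List Int) :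
    segFold h (h :: l) = segFold h l := by
  rw [segFold_cons, pyGcd_self]

-- A's dedup loop keeps its two components equal and equal to the running set
theorem dedup_pair (l : List Int) :
    ∀ s : PySem.Set Int, l.foldl stepD (s, s) = (l.foldl PySem.Set.add s, l.foldl PySem.Set.add s) := by
  induction l with
  | nil => intro s; rfl
  | cons e t ih =>
    intro s
    have hstep : stepD (s, s) e = (PySem.Set.add s e, PySem.Set.add s e) := by
      by_cases h : e ∈ s
      · simp [stepD, PySem.Set.add, h]
      · simp [stepD, PySem.Set.add, h]
    simp only [List.foldl_cons, hstep, ih]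

-- generic: a fold whose step only adds elements satisfying P i
theorem foldl_mem_acc {β : Type} (step : PySem.Set Int → β → PySem.Set Int)
    (P : β → Int → Prop) :
    ∀ (l : List β), (∀ s i, i ∈ l → ∀ x, (x ∈ step s i ↔ x ∈ s ∨ P i x)) →
      ∀ (init : PySem.Set Int) (x : Int),
        (x ∈ l.foldl step init ↔ x ∈ init ∨ ∃ i ∈ l, P i x) := by
  intro l
  induction l with
  | nil => intro _ init x; simp
  | cons i t ih =>
    intro hstep init x
    simp only [List.foldl_cons]
    rw [ih (fun s j hj y => hstep s j (List.mem_cons_of_mem i hj) y) (step init i) x,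
        hstep init i (List.mem_cons_self) x]
    constructor
    · rintro ((hx | hP) | ⟨j, hj, hPj⟩)
      · exact Or.inl hx
      · exact Or.inr ⟨i, List.mem_cons_self, hP⟩
      · exact Or.inr ⟨j, List.mem_cons_of_mem i hj, hPj⟩
    · rintro (hx | ⟨j, hj, hPj⟩)
      · exact Or.inl (Or.inl hx)
      · rcases List.mem_cons.mp hj with rfl | hj
        · exact Or.inl (Or.inr hPj)
        · exact Or.inr ⟨j, hj, hPj⟩

-- membership in A's inner loop accumulator
theorem inner_mem (l : List Int) :
    ∀ (c : Int) (ans : PySem.Set Int) (x : Int),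
      (x ∈ (l.foldl fA (c, ans)).2 ↔
        x ∈ ans ∨ ∃ p q, l = p ++ q ∧ p ≠ [] ∧ x = segFold c p) := by
  induction l with
  | nil =>
    intro c ans x
    simp only [List.foldl_nil]
    constructor
    · exact Or.inl
    · rintro (hx | ⟨p, q, hpq, hp, _⟩)
      · exact hx
      · cases p with
        | nil => exact absurd rfl hp
        | cons a p' => simp at hpq
  | cons v t ih =>
    intro c ans x
    simp only [List.foldl_cons]
    have : fA (c, ans) v = (pyGcd c v, PySem.Set.add ans (pyGcd c v)) := rfl
    rw [this, ih, PySem.Set.mem_add]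
    constructor
    · rintro ((hx | hx) | ⟨p, q, hpq, hp, hx⟩)
      · exact Or.inl hx
      · exact Or.inr ⟨[v], t, rfl, by simp, by simpa [segFold] using hx⟩
      · exact Or.inr ⟨v :: p, q, by simp [hpq], by simp, by rw [segFold_cons]; exact hx⟩
    · rintro (hx | ⟨p, q, hpq, hp, hx⟩)
      · exact Or.inl (Or.inl hx)
      · cases p with
        | nil => exact absurd rfl hp
        | cons a p' =>
          simp only [List.cons_append, List.cons.injEq] at hpq
          obtain ⟨rfl, htq⟩ := hpq
          cases p' with
          | nil => exact Or.inl (Or.inr (by simpa [segFold] using hx))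
          | cons b p'' =>
            exact Or.inr ⟨b :: p'', q, htq, by simp, by rw [segFold_cons] at hx; exact hx⟩

-- membership in B's loop: first component = answer set, second = gcds of segments ending at the end
theorem loopB_mem (l : List Int) :
    ∀ (ans prev : PySem.Set Int) (x : Int),
      ((x ∈ (l.foldl stepB (ans, prev)).1 ↔
         x ∈ ans ∨ (∃ g ∈ prev, ∃ p q, l = p ++ q ∧ p ≠ [] ∧ x = segFold g p) ∨ SegMem l x)
      ∧ (x ∈ (l.foldl stepB (ans, prev)).2 ↔
         (∃ g ∈ prev, x = segFold g l) ∨ (∃ pre h mid, l = pre ++ h :: mid ∧ x = segFold h mid))) := by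
  induction l with
  | nil =>
    intro ans prev x
    constructor
    · simp only [List.foldl_nil]
      constructor
      · exact fun h => Or.inl h
      · rintro (h | ⟨g, _, p, q, hpq, hp, _⟩ | ⟨pre, h, rest, hu, _⟩)
        · exact h
        · cases p with
          | nil => exact absurd rfl hp
          | cons a p' => simp at hpq
        · simp at hu
    · simp only [List.foldl_nil]
      constructor
      · intro h; exact Or.inl ⟨x, h, rfl⟩
      · rintro (⟨g, hg, hx⟩ | ⟨pre, h, mid, hu, _⟩)
        · simpa [segFold] using hx ▸ hg
        · simp at hu
  | cons y t ih =>
    intro ans prev x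
    simp only [List.foldl_cons]
    have hmemcur : ∀ x' : Int,
        x' ∈ PySem.Set.add (PySem.Set.ofList (prev.map (fun g => pyGcd g y))) y ↔
          (∃ g ∈ prev, x' = pyGcd g y) ∨ x' = y := by
      intro x'
      rw [PySem.Set.mem_add, PySem.Set.mem_ofList, List.mem_map]
      constructor
      · rintro (⟨g, hg, hgx⟩ | hx)
        · exact Or.inl ⟨g, hg, hgx.symm⟩
        · exact Or.inr hx
      · rintro (⟨g, hg, hgx⟩ | hx)
        · exact Or.inl ⟨g, hg, hgx.symm⟩
        · exact Or.inr hx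
    have hstep : stepB (ans, prev) y =
        (PySem.Set.union ans (PySem.Set.add (PySem.Set.ofList (prev.map (fun g => pyGcd g y))) y),
         PySem.Set.add (PySem.Set.ofList (prev.map (fun g => pyGcd g y))) y) := rfl
    rw [hstep]
    obtain ⟨ih1, ih2⟩ := ih (PySem.Set.union ans (PySem.Set.add (PySem.Set.ofList (prev.map (fun g => pyGcd g y))) y))
      (PySem.Set.add (PySem.Set.ofList (prev.map (fun g => pyGcd g y))) y) x
    constructor
    · rw [ih1, PySem.Set.mem_union]
      constructor
      · rintro ((hx | hcur) | ⟨g', hg', p, q, hpq, hp, hx⟩ | hseg)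
        · exact Or.inl hx
        · rcases (hmemcur x).mp hcur with ⟨g, hg, hx⟩ | hx
          · exact Or.inr (Or.inl ⟨g, hg, [y], t, rfl, by simp, by simpa [segFold] using hx⟩)
          · exact Or.inr (Or.inr ⟨[], y, t, rfl, [], t, rfl, by simpa [segFold] using hx⟩)
        · rcases (hmemcur g').mp hg' with ⟨g, hg, hgx⟩ | hgx
          · exact Or.inr (Or.inl ⟨g, hg, y :: p, q, by simp [hpq], by simp,
              by rw [segFold_cons, ← hgx]; exact hx⟩)
          · exact Or.inr (Or.inr ⟨[], y, t, rfl, p, q, hpq, hgx ▸ hx⟩)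
        · obtain ⟨pre, h, rest, hu, mid, suf, hrest, hx⟩ := hseg
          exact Or.inr (Or.inr ⟨y :: pre, h, rest, by simp [hu], mid, suf, hrest, hx⟩)
      · rintro (hx | ⟨g, hg, p, q, hpq, hp, hx⟩ | hseg)
        · exact Or.inl (Or.inl hx)
        · cases p with
          | nil => exact absurd rfl hp
          | cons a p' =>
            simp only [List.cons_append, List.cons.injEq] at hpq
            obtain ⟨rfl, htq⟩ := hpq
            cases p' with
            | nil =>
              refine Or.inl (Or.inr ((hmemcur x).mpr (Or.inl ⟨g, hg, ?_⟩)))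
              simpa [segFold] using hx
            | cons b p'' =>
              refine Or.inr (Or.inl ⟨pyGcd g y, (hmemcur _).mpr (Or.inl ⟨g, hg, rfl⟩),
                b :: p'', q, htq, by simp, ?_⟩)
              rw [segFold_cons] at hx; exact hx
        · obtain ⟨pre, h, rest, hu, mid, suf, hrest, hx⟩ := hseg
          cases pre with
          | nil =>
            simp only [List.nil_append, List.cons.injEq] at hu
            obtain ⟨rfl, rfl⟩ := hu
            cases mid with
            | nil =>
              refine Or.inl (Or.inr ((hmemcur x).mpr (Or.inr ?_)))
              simpa [segFold] using hx
            | cons b mid' =>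
              have hy : pyGcd y b = pyGcd y b := rfl
              subst hrest
              refine Or.inr (Or.inl ⟨y, (hmemcur y).mpr (Or.inr rfl), b :: mid', suf, rfl, by simp, ?_⟩)
              rw [segFold_cons] at hx ⊢; exact hx
          | cons a pre' =>
            simp only [List.cons_append, List.cons.injEq] at hu
            obtain ⟨rfl, htq⟩ := hu
            exact Or.inr (Or.inr ⟨pre', h, rest, htq, mid, suf, hrest, hx⟩)
    · rw [ih2]
      constructor
      · rintro (⟨g', hg', hx⟩ | ⟨pre, h, mid, hu, hx⟩)
        · rcases (hmemcur g').mp hg' with ⟨g, hg, hgx⟩ | hgx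
          · exact Or.inl ⟨g, hg, by rw [segFold_cons, ← hgx]; exact hx⟩
          · exact Or.inr ⟨[], y, t, rfl, hgx ▸ hx⟩
        · exact Or.inr ⟨y :: pre, h, mid, by simp [hu], hx⟩
      · rintro (⟨g, hg, hx⟩ | ⟨pre, h, mid, hu, hx⟩)
        · refine Or.inl ⟨pyGcd g y, (hmemcur _).mpr (Or.inl ⟨g, hg, rfl⟩), ?_⟩
          rw [segFold_cons] at hx; exact hx
        · cases pre with
          | nil =>
            simp only [List.nil_append, List.cons.injEq] at hu
            obtain ⟨rfl, rfl⟩ := hu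
            exact Or.inl ⟨y, (hmemcur y).mpr (Or.inr rfl), hx⟩
          | cons a pre' =>
            simp only [List.cons_append, List.cons.injEq] at hu
            obtain ⟨rfl, htq⟩ := hu
            exact Or.inr ⟨pre', h, mid, htq, hx⟩

theorem ansA_mem (u : List Int) (x : Int) : x ∈ ansA u ↔ SegMem u x := by
  have hstep : ∀ (s : PySem.Set Int) (i : Int), i ∈ PySem.List.pyRange 0 (PySem.List.len u) →
      ∀ x : Int, (x ∈ outerStep u s i ↔
        x ∈ s ∨ ∃ p q, u.drop i.toNat = p ++ q ∧ p ≠ [] ∧ x = segFold (PySem.List.pyGetD u i 0) p) := by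
    intro s i hi x
    have h0 : 0 ≤ i := (PySem.List.mem_pyRange_one.mp hi).1
    have heq : outerStep u s i = ((u.drop i.toNat).foldl fA (PySem.List.pyGetD u i 0, s)).2 := by
      unfold outerStep
      exact congrArg Prod.snd (PySem.List.foldl_pyRange_pyGetD u 0 fA _ h0)
    rw [heq, inner_mem]
  rw [ansA, foldl_mem_acc (outerStep u)
    (fun i x => ∃ p q, u.drop i.toNat = p ++ q ∧ p ≠ [] ∧ x = segFold (PySem.List.pyGetD u i 0) p)
    _ hstep PySem.Set.empty x]
  constructor
  · rintro (hx | ⟨i, hi, p, q, hpq, hp, hx⟩)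
    · exact absurd hx (List.not_mem_nil)
    · obtain ⟨h0, hilt⟩ := PySem.List.mem_pyRange_one.mp hi
      have hlt : i < (u.length : Int) := by simpa [PySem.List.len] using hilt
      have hk : i.toNat < u.length := by omega
      have hd : u.drop i.toNat = u[i.toNat] :: u.drop (i.toNat + 1) := List.drop_eq_getElem_cons hk
      have hget : PySem.List.pyGetD u i 0 = u[i.toNat] := PySem.List.pyGetD_eq_getElem u 0 h0 hlt
      cases p with
      | nil => exact absurd rfl hp
      | cons c p' =>
        rw [hd] at hpq
        simp only [List.cons_append, List.cons.injEq] at hpq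
        obtain ⟨he, hdq⟩ := hpq
        refine ⟨u.take i.toNat, u[i.toNat], u.drop (i.toNat + 1),
          by rw [← hd]; exact (List.take_append_drop _ u).symm, p', q, hdq, ?_⟩
        rw [hget, ← he] at hx
        rw [segFold_self] at hx
        exact hx
  · rintro ⟨pre, h, rest, hu, mid, suf, hrest, hx⟩
    right
    have hlen : u.length = pre.length + (rest.length + 1) := by
      rw [hu]; simp
    have hd : u.drop pre.length = h :: rest := by
      rw [hu, List.drop_left]
    have hk : pre.length < u.length := by omega
    have hget : PySem.List.pyGetD u ((pre.length : Nat) : Int) 0 = h := by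
      rw [PySem.List.pyGetD_natCast]
      have : u[pre.length] = h := by
        have := List.drop_eq_getElem_cons hk
        rw [hd] at this
        exact (List.cons.injEq .. ▸ this : _ ∧ _).1.symm
      rw [List.getD_eq_getElem?_getD, List.getElem?_eq_getElem hk, this]
      rfl
    refine ⟨(pre.length : Int), PySem.List.mem_pyRange_one.mpr ⟨by positivity, ?_⟩,
      h :: mid, suf, ?_, by simp, ?_⟩
    · simp only [PySem.List.len]
      exact_mod_cast hk
    · simp only [Int.toNat_natCast, hd, hrest, List.cons_append]
    · rw [hget, segFold_self]
      exact hx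

theorem inner_nodup (l u : List Int) :
    ∀ (c : Int) (ans : PySem.Set Int), (ans : List Int).Nodup →
      ((l.foldl (fun (p : Int × PySem.Set Int) j =>
          let c := pyGcd p.1 (PySem.List.pyGetD u j 0)
          (c, PySem.Set.add p.2 c)) (c, ans)).2 : List Int).Nodup := by
  induction l with
  | nil => intro c ans hnd; exact hnd
  | cons v t ih => intro c ans hnd; exact ih _ _ (PySem.Set.nodup_add _ _ hnd)

theorem nodup_ansA (u : List Int) : (ansA u : List Int).Nodup := by
  have : ∀ (l : List Int) (init : PySem.Set Int), (init : List Int).Nodup →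
      ((l.foldl (outerStep u) init : List Int)).Nodup := by
    intro l
    induction l with
    | nil => intro init h; exact h
    | cons i t ih => intro init h; exact ih _ (inner_nodup _ u _ init h)
  exact this _ PySem.Set.empty List.nodup_nil

theorem nodup_ansB (u : List Int) :
    ((u.foldl stepB (PySem.Set.empty, PySem.Set.empty)).1 : List Int).Nodup := by
  have : ∀ (l : List Int) (ans prev : PySem.Set Int), (ans : List Int).Nodup →
      ((l.foldl stepB (ans, prev)).1 : List Int).Nodup := by
    intro l
    induction l with
    | nil => intro ans prev h; exact h
    | cons y t ih => intro ans prev h; exact ih _ _ (PySem.Set.nodup_union _ _ h)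
  exact this _ _ _ List.nodup_nil

-- ===== VERDICT (by name: the statement is the Claim_ definition above) =====
theorem solve_spec : Claim_equal_solve := by
  intro n a _
  unfold Spec_solve
  show solve n a = solve_alt n a
  have hA : solve n a = PySem.Set.len (ansA ((a.foldl stepD ([], PySem.Set.empty)).1)) := rfl
  have hB : solve_alt n a =
      PySem.Set.len (((PySem.List.dedup a).foldl stepB (PySem.Set.empty, PySem.Set.empty)).1) := rfl
  have hpair : a.foldl stepD ([], PySem.Set.empty) =
      (a.foldl PySem.Set.add [], a.foldl PySem.Set.add []) := dedup_pair a []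
  have hu : (a.foldl stepD ([], PySem.Set.empty)).1 = PySem.List.dedup a := by
    rw [hpair, PySem.List.dedup_eq_ofList, PySem.Set.ofList_eq_foldl]
  rw [hA, hB, hu]
  set u := PySem.List.dedup a with hudef
  have hBmem : ∀ x : Int,
      x ∈ ((u.foldl stepB (PySem.Set.empty, PySem.Set.empty)).1 : List Int) ↔ SegMem u x := by
    intro x
    rw [(loopB_mem u PySem.Set.empty PySem.Set.empty x).1]
    constructor
    · rintro (hx | ⟨g, hg, _⟩ | hseg)
      · exact absurd hx (List.not_mem_nil)
      · exact absurd hg (List.not_mem_nil)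
      · exact hseg
    · exact fun hseg => Or.inr (Or.inr hseg)
  have hperm : (ansA u : List Int).Perm ((u.foldl stepB (PySem.Set.empty, PySem.Set.empty)).1 : List Int) :=
    (List.perm_ext_iff_of_nodup (nodup_ansA u) (nodup_ansB u)).mpr
      (fun x => by rw [ansA_mem, hBmem])
  simp only [PySem.Set.len, hperm.length_eq]
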